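-- pv_equiv track=rewrite | github.com/ahmedraza1996/dtw | main_compare.py | extract_action_segments
-- ===== SOURCE A (Python) =====
-- def extract_action_segments(ground_truth):
-- 	segments = {}
-- 	start = None
-- 	current_class = None
-- 	for i, label in enumerate(ground_truth):
-- 		if label != current_class:
-- 			if start is not None:
-- 				segments[current_class] = [start, i - 1]
-- 			current_class = label
-- 			start = i
-- 			if current_class not in segments:
-- 				segments[current_class] = []
-- 	if start is not None:
-- 		segments[current_class] = [start, len(ground_truth) - 1]
-- 	return segments
-- ===== SOURCE B (Python) =====
-- def extract_action_segments(ground_truth):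
--     # Phase 1: run-length encode the label sequence.
--     runs = []
--     for label in ground_truth:
--         if runs and runs[-1][0] == label:
--             runs[-1][1] += 1
--         else:
--             runs.append([label, 1])
--     # Phase 2: one dict write per run (last run of a repeated label wins).
--     segments = {}
--     idx = 0
--     for label, length in runs:
--         segments[label] = [idx, idx + length - 1]
--         idx += length
--     return segments
-- ===== Notes on version B (the rewrite author's own statement) =====
-- stated objective: alternative
-- what changed: Replaced A's per-element state machine (None sentinels, placeholder [] dict entries patched later) by a two-phase algorithm: run-length encode the label sequence, then emit one dict write [idx, idx+len-1] per run.
import Mathlib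
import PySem

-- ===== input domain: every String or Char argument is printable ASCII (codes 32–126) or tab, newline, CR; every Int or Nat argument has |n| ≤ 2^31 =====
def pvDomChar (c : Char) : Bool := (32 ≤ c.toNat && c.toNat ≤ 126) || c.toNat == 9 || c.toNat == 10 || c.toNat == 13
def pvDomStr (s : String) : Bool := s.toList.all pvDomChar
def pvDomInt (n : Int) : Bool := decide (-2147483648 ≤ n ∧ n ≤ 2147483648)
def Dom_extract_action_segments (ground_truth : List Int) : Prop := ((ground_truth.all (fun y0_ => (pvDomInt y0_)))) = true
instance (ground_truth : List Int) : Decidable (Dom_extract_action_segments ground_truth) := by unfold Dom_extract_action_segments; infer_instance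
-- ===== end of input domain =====

-- B replaces A's per-element state machine (sentinels + placeholder dict entries) by a two-phase
-- run-length encoding followed by one dict write per run; objective: alternative (same O(n) cost).

-- ===== PORT A =====
-- the for-loop of A, with the running index i threaded explicitly
def pvALoop (segments : PySem.Dict Int (List Int)) (start current : Option Int) (i : Int) :
    List Int → PySem.Dict Int (List Int) × Option Int × Option Int
  | [] => (segments, start, current)
  | label :: rest =>
    if some label ≠ current then
      -- Python tests 'start is not None'; start and current_class are always set together,
      -- so the match on both options is the same test
      let segments :=
        match start, current with
        | some s, some c => segments.insert c [s, i - 1]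
        | _, _ => segments
      let current := some label
      let start := some i
      let segments := if segments.contains label then segments else segments.insert label []
      pvALoop segments start current (i + 1) rest
    else
      pvALoop segments start current (i + 1) rest

def extract_action_segments (ground_truth : List Int) : List (Int × List Int) :=
  match pvALoop PySem.Dict.empty none none 0 ground_truth with
  | (segments, some s, some c) => (segments.insert c [s, (ground_truth.length : Int) - 1]).items
  | (segments, _, _) => segments.items

-- ===== PORT B =====
-- phase 1 body: extend the last run or start a new one  (runs[-1][1] += 1 / runs.append([label, 1]))
def pvRunStep (runs : List (Int × Int)) (label : Int) : List (Int × Int) :=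
  match runs.getLast? with
  | some (c, n) => if c = label then runs.dropLast ++ [(c, n + 1)] else runs ++ [(label, 1)]
  | none => runs ++ [(label, 1)]

-- phase 2 body: segments[label] = [idx, idx + length - 1]; idx += length
def pvSegStep (st : PySem.Dict Int (List Int) × Int) (r : Int × Int) :
    PySem.Dict Int (List Int) × Int :=
  (st.1.insert r.1 [st.2, st.2 + r.2 - 1], st.2 + r.2)

def extract_action_segments_alt (ground_truth : List Int) : List (Int × List Int) :=
  let runs := ground_truth.foldl pvRunStep []
  (runs.foldl pvSegStep (PySem.Dict.empty, 0)).1.items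

-- ===== PRECONDITION & SPEC =====
def Spec_extract_action_segments (ground_truth : List Int) (out : List (Int × List Int)) : Prop := out = extract_action_segments_alt ground_truth
instance (ground_truth : List Int) (out : List (Int × List Int)) : Decidable (Spec_extract_action_segments ground_truth out) := by unfold Spec_extract_action_segments; infer_instance

-- ===== CLAIM (what is proved, stated in full; the proofs are below) =====
def Claim_equal_extract_action_segments : Prop := ∀ (ground_truth : List Int), Dom_extract_action_segments ground_truth → Spec_extract_action_segments ground_truth (extract_action_segments ground_truth)

-- ===== LEMMAS AND PROOFS =====

-- canonical run-length encoding with a pending run (c, n), proof-side only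
def pvRunsAux (c n : Int) : List Int → List (Int × Int)
  | [] => [(c, n)]
  | x :: xs => if x = c then pvRunsAux c (n + 1) xs else (c, n) :: pvRunsAux x 1 xs

lemma pvRunStep_fold (l : List Int) : ∀ (front : List (Int × Int)) (c n : Int),
    l.foldl pvRunStep (front ++ [(c, n)]) = front ++ pvRunsAux c n l := by
  induction l with
  | nil => intro front c n; simp [pvRunsAux]
  | cons x xs ih =>
    intro front c n
    by_cases h : x = c
    · simp [pvRunStep, pvRunsAux, h, ih]
    · simp only [List.foldl_cons, pvRunStep, List.getLast?_concat, List.dropLast_concat]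
      rw [if_neg (show ¬ c = x from fun hh => h hh.symm)]
      rw [ih (front ++ [(c, n)]) x 1]
      simp [pvRunsAux, if_neg h]

lemma pvRunsAux_head (c n : Int) (l : List Int) :
    ∃ m rest, pvRunsAux c n l = (c, m) :: rest := by
  induction l generalizing n with
  | nil => exact ⟨n, [], rfl⟩
  | cons x xs ih =>
    by_cases h : x = c
    · simpa [pvRunsAux, h] using ih (n + 1)
    · exact ⟨n, pvRunsAux x 1 xs, by simp [pvRunsAux, h]⟩

lemma pvInsert_insert_of_not_contains (d : PySem.Dict Int (List Int)) (k : Int)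
    (u v : List Int) (h : d.contains k = false) :
    (d.insert k u).insert k v = d.insert k v := by
  apply PySem.Dict.ext
  have hk : k ∉ d.keys := by
    intro hmem
    rw [← PySem.Dict.contains_iff_mem_keys] at hmem
    rw [h] at hmem
    exact Bool.false_ne_true hmem
  have hmem : ∀ p ∈ d.items, (p.1 == k) = false := by
    intro p hp
    apply beq_eq_false_iff_ne.mpr
    intro hkk
    apply hk
    rw [← hkk]
    simp only [PySem.Dict.keys]
    exact List.mem_map_of_mem hp
  simp only [PySem.Dict.items_insert, PySem.Dict.contains_insert_self, h, if_true, if_false,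
    Bool.false_eq_true]
  rw [List.map_append]
  have h1 : d.items.map (fun p => if (p.1 == k) = true then (k, v) else p) = d.items := by
    calc d.items.map (fun p => if (p.1 == k) = true then (k, v) else p)
        = d.items.map id := List.map_congr_left (fun p hp => by simp [hmem p hp])
      _ = d.items := List.map_id _
  rw [h1]
  simp

lemma pvFold_placeholder (l : List Int) (x n i : Int) (d : PySem.Dict Int (List Int))
    (h : d.contains x = false) :
    ((pvRunsAux x n l).foldl pvSegStep (d.insert x [], i)).1
      = ((pvRunsAux x n l).foldl pvSegStep (d, i)).1 := by
  obtain ⟨m, rest, hr⟩ := pvRunsAux_head x n l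
  rw [hr]
  simp only [List.foldl_cons, pvSegStep]
  rw [pvInsert_insert_of_not_contains d x [] [i, i + m - 1] h]

lemma pvALoop_some (l : List Int) : ∀ (d : PySem.Dict Int (List Int)) (s c i : Int),
    ∃ d' s' c', pvALoop d (some s) (some c) i l = (d', some s', some c') := by
  induction l with
  | nil => exact fun d s c i => ⟨d, s, c, rfl⟩
  | cons x xs ih =>
    intro d s c i
    by_cases h : x = c
    · subst h
      have step : pvALoop d (some s) (some x) i (x :: xs)
          = pvALoop d (some s) (some x) (i + 1) xs := by simp [pvALoop]
      rw [step]; exact ih d s x (i + 1)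
    · by_cases hc : (d.insert c [s, i - 1]).contains x = true
      · have step : pvALoop d (some s) (some c) i (x :: xs)
            = pvALoop (d.insert c [s, i - 1]) (some i) (some x) (i + 1) xs := by
          simp [pvALoop, h, hc]
        rw [step]; exact ih _ i x (i + 1)
      · have step : pvALoop d (some s) (some c) i (x :: xs)
            = pvALoop ((d.insert c [s, i - 1]).insert x []) (some i) (some x) (i + 1) xs := by
          simp [pvALoop, h, hc]
        rw [step]; exact ih _ i x (i + 1)

lemma pvG (l : List Int) : ∀ (i s c : Int) (d : PySem.Dict Int (List Int)),
    (match pvALoop d (some s) (some c) i l with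
     | (d', some s', some c') => d'.insert c' [s', i + (l.length : Int) - 1]
     | (d', _, _) => d')
    = ((pvRunsAux c (i - s) l).foldl pvSegStep (d, s)).1 := by
  induction l with
  | nil =>
    intro i s c d
    show d.insert c [s, i + (([] : List Int).length : Int) - 1]
        = ((pvRunsAux c (i - s) []).foldl pvSegStep (d, s)).1
    have harith : i + (([] : List Int).length : Int) - 1 = s + (i - s) - 1 := by
      simp only [List.length_nil]; push_cast; ring
    rw [harith]
    rfl
  | cons x xs ih =>
    intro i s c d
    by_cases h : x = c
    · subst h
      have step : pvALoop d (some s) (some x) i (x :: xs)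
          = pvALoop d (some s) (some x) (i + 1) xs := by simp [pvALoop]
      rw [step]
      obtain ⟨d', s', c', hL⟩ := pvALoop_some xs d s x (i + 1)
      rw [hL]
      dsimp only
      have hIH := ih (i + 1) s x d
      rw [hL] at hIH
      dsimp only at hIH
      rw [show i + 1 - s = i - s + 1 by ring] at hIH
      rw [show i + ((x :: xs).length : Int) - 1 = (i + 1) + (xs.length : Int) - 1 by
        simp only [List.length_cons]; push_cast; ring]
      rw [hIH]
      simp [pvRunsAux]
    · by_cases hc : (d.insert c [s, i - 1]).contains x = true
      · have step : pvALoop d (some s) (some c) i (x :: xs)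
            = pvALoop (d.insert c [s, i - 1]) (some i) (some x) (i + 1) xs := by
          simp [pvALoop, h, hc]
        rw [step]
        obtain ⟨d', s', c', hL⟩ := pvALoop_some xs (d.insert c [s, i - 1]) i x (i + 1)
        rw [hL]
        dsimp only
        have hIH := ih (i + 1) i x (d.insert c [s, i - 1])
        rw [hL] at hIH
        dsimp only at hIH
        rw [show i + 1 - i = (1 : Int) by ring] at hIH
        rw [show i + ((x :: xs).length : Int) - 1 = (i + 1) + (xs.length : Int) - 1 by
          simp only [List.length_cons]; push_cast; ring]
        rw [hIH]
        simp only [pvRunsAux, if_neg h, List.foldl_cons, pvSegStep]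
        rw [show s + (i - s) - 1 = i - 1 by ring, show s + (i - s) = i by ring]
      · have step : pvALoop d (some s) (some c) i (x :: xs)
            = pvALoop ((d.insert c [s, i - 1]).insert x []) (some i) (some x) (i + 1) xs := by
          simp [pvALoop, h, hc]
        rw [step]
        obtain ⟨d', s', c', hL⟩ := pvALoop_some xs ((d.insert c [s, i - 1]).insert x []) i x (i + 1)
        rw [hL]
        dsimp only
        have hIH := ih (i + 1) i x ((d.insert c [s, i - 1]).insert x [])
        rw [hL] at hIH
        dsimp only at hIH
        rw [show i + 1 - i = (1 : Int) by ring] at hIH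
        rw [show i + ((x :: xs).length : Int) - 1 = (i + 1) + (xs.length : Int) - 1 by
          simp only [List.length_cons]; push_cast; ring]
        rw [hIH]
        simp only [pvRunsAux, if_neg h, List.foldl_cons, pvSegStep]
        rw [show s + (i - s) - 1 = i - 1 by ring, show s + (i - s) = i by ring]
        exact pvFold_placeholder xs x 1 i (d.insert c [s, i - 1]) (by simpa using hc)

-- ===== VERDICT (by name: the statement is the Claim_ definition above) =====
theorem extract_action_segments_spec : Claim_equal_extract_action_segments := by
  intro gt _
  unfold Spec_extract_action_segments extract_action_segments extract_action_segments_alt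
  cases gt with
  | nil => rfl
  | cons x xs =>
    have step : pvALoop PySem.Dict.empty none none 0 (x :: xs)
        = pvALoop (PySem.Dict.empty.insert x []) (some 0) (some x) 1 xs := by
      simp [pvALoop, PySem.Dict.contains_empty]
    rw [step]
    obtain ⟨d', s', c', hL⟩ := pvALoop_some xs (PySem.Dict.empty.insert x []) 0 x 1
    rw [hL]
    dsimp only
    have hfold : List.foldl pvRunStep [] (x :: xs) = pvRunsAux x 1 xs := by
      calc List.foldl pvRunStep [] (x :: xs)
          = List.foldl pvRunStep ([] ++ [(x, 1)]) xs := by rw [List.foldl_cons]; rfl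
        _ = [] ++ pvRunsAux x 1 xs := pvRunStep_fold xs [] x 1
        _ = pvRunsAux x 1 xs := by simp
    rw [hfold]
    have hG := pvG xs 1 0 x (PySem.Dict.empty.insert x [])
    rw [hL] at hG
    dsimp only at hG
    rw [show (1 : Int) - 0 = 1 by norm_num] at hG
    rw [show ((x :: xs).length : Int) - 1 = 1 + (xs.length : Int) - 1 by simp only [List.length_cons]; push_cast; ring]
    rw [hG]
    exact congrArg PySem.Dict.items
      (pvFold_placeholder xs x 1 0 PySem.Dict.empty (PySem.Dict.contains_empty x))
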